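-- pv_equiv track=rewrite | github.com/stbrumme/leetcode | 2088.py | countPyramids
-- ===== SOURCE A (Python) =====
-- from typing import List
--
-- def countPyramids(grid: List[List[int]]) -> int:
--     height = len(grid)
--     width  = len(grid[0])
--
--     spans = [] # consecutive fertile cells on the left side, including current cell (prefix sum)
--     for y in range(height):
--         row = []
--         count = 0
--         for x in range(width):
--             if grid[y][x] == 0:
--                 count  = 0 # reset
--             else:
--                 count += 1
--             row.append(count)
--         spans.append(row)
--
--     result = 0
--     for y in range(height):
--         for x in range(width):
--             # "normal" pyramids (apex at top)
--             for i in range(height):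
--                 dx = x + i
--                 dy = y + i
--                 if dx >= width or dy >= height:
--                     break
--
--                 # expected width of pyramid
--                 need = 2 * i + 1
--                 if spans[dy][dx] < need:
--                     break
--
--                 # at least two cells high
--                 if i >= 1:
--                     result += 1
--
--             # "inverted" pyramids (apex at bottom)
--             # same code but dy goes up instead of down
--             for i in range(height):
--                 dx = x + i
--                 dy = y - i
--                 if dx >= width or dy < 0:
--                     break
--
--                 # expected width of pyramid
--                 need = 2 * i + 1
--                 if spans[dy][dx] < need:
--                     break
--
--                 # at least two cells high
--                 if i >= 1:
--                     result += 1
--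
--     return result
-- ===== SOURCE B (Python) =====
-- from typing import List
--
-- def _countDirection(grid: List[List[int]], W: int) -> int:
--     # counts apex-at-top pyramids by DP: scan rows bottom-up keeping, per cell,
--     # the tallest pyramid whose apex is that cell; each cell contributes height-1
--     prev = [0] * W
--     total = 0
--     for row in reversed(grid):
--         cur = []
--         for x in range(W):
--             if row[x] == 0:
--                 cur.append(0)
--             else:
--                 left = prev[x - 1] if x > 0 else 0
--                 right = prev[x + 1] if x + 1 < W else 0
--                 cur.append(1 + min(left, prev[x], right))
--         total += sum(max(v - 1, 0) for v in cur)
--         prev = cur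
--     return total
--
-- def countPyramids(grid: List[List[int]]) -> int:
--     W = len(grid[0])
--     # inverted pyramids in grid = normal pyramids in the vertically flipped grid
--     return _countDirection(grid, W) + _countDirection(grid[::-1], W)
-- ===== Notes on version B (the rewrite author's own statement) =====
-- stated objective: faster
-- what changed: A precomputes row run-lengths and then, for every cell, walks the pyramid row by row (an O(H) scan per apex, in both directions); B replaces this by a single dynamic-programming row swept over the grid (tallest pyramid per apex from the three cells below, inverted pyramids via a vertical flip), summing height-1 per cell in one pass.
import Mathlib
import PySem

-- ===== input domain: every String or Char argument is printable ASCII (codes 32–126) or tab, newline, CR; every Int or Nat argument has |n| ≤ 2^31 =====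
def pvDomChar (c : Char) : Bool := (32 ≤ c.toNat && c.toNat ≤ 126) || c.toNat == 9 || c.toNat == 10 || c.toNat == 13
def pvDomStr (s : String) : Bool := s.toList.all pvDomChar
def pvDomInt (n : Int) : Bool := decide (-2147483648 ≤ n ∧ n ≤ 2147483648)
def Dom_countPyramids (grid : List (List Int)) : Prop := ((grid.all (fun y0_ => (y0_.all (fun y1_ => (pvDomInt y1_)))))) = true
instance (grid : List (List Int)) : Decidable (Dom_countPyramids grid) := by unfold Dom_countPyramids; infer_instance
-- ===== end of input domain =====

-- B replaces A's per-apex O(H) extension scan by an O(H*W) DP over rows (tallest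
-- pyramid per apex, inverted direction via a vertical flip); objective: faster.

-- ===== PORT A =====
-- A: per-row prefix run lengths 'spans', then for every cell walk the pyramid
-- downwards (goTopA) / upwards (goInvA) until a row fails ('break' → fuel recursion).
def spansOfA (grid : List (List Int)) (H W : Nat) : List (List Int) :=
  (List.range H).map (fun y =>
    ((List.range W).foldl (fun (st : List Int × Int) x =>
      let count : Int := if (grid.getD y []).getD x 0 = 0 then 0 else st.2 + 1
      (st.1 ++ [count], count)) ([], 0)).1)

def goTopA (spans : List (List Int)) (H W y x : Nat) : Nat → Nat → Int
  | _, 0 => 0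
  | i, fuel+1 =>
    if W ≤ x + i ∨ H ≤ y + i then 0
    else if (spans.getD (y+i) []).getD (x+i) 0 < 2*(i:Int)+1 then 0
    else (if 1 ≤ i then 1 else 0) + goTopA spans H W y x (i+1) fuel

def goInvA (spans : List (List Int)) (H W y x : Nat) : Nat → Nat → Int
  | _, 0 => 0
  | i, fuel+1 =>
    if W ≤ x + i ∨ y < i then 0
    else if (spans.getD (y-i) []).getD (x+i) 0 < 2*(i:Int)+1 then 0
    else (if 1 ≤ i then 1 else 0) + goInvA spans H W y x (i+1) fuel

def countPyramids (grid : List (List Int)) : Int :=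
  let H := grid.length
  let W := (grid.headD []).length
  let spans := spansOfA grid H W
  (List.range H).foldl (fun r y =>
    (List.range W).foldl (fun r x =>
      r + goTopA spans H W y x 0 H + goInvA spans H W y x 0 H) r) 0

-- ===== PORT B =====
-- B: one DP row swept over the grid; cur[x] = tallest apex-at-top pyramid at (y,x).
def dirCountB (grid : List (List Int)) (W : Nat) : Int :=
  (grid.reverse.foldl (fun (st : List Int × Int) row =>
    let cur := (List.range W).map (fun x =>
      if row.getD x 0 = 0 then 0
      else 1 + min (min (if 0 < x then st.1.getD (x-1) 0 else 0) (st.1.getD x 0))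
                   (if x+1 < W then st.1.getD (x+1) 0 else 0))
    (cur, st.2 + cur.foldl (fun s v => s + max (v-1) 0) 0))
    (List.replicate W 0, 0)).2

def countPyramids_alt (grid : List (List Int)) : Int :=
  let W := (grid.headD []).length
  dirCountB grid W + dirCountB grid.reverse W

-- ===== PRECONDITION & SPEC =====
-- Pre_ excludes exactly the inputs where Python A raises IndexError: the empty
-- grid (grid[0]) and grids with some row shorter than the first row (grid[y][x]).
def Pre_countPyramids (grid : List (List Int)) : Prop :=
  grid ≠ [] ∧ ∀ row ∈ grid, (grid.headD []).length ≤ row.length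
instance (grid : List (List Int)) : Decidable (Pre_countPyramids grid) := by
  unfold Pre_countPyramids; infer_instance

def pvWitness_countPyramids : List (List Int) := [[1, 1, 1], [1, 1, 1]]

def Spec_countPyramids (grid : List (List Int)) (out : Int) : Prop := out = countPyramids_alt grid
instance (grid : List (List Int)) (out : Int) : Decidable (Spec_countPyramids grid out) := by unfold Spec_countPyramids; infer_instance

-- ===== CLAIM (what is proved, stated in full; the proofs are below) =====
def Claim_equal_countPyramids : Prop := ∀ (grid : List (List Int)), Dom_countPyramids grid → Pre_countPyramids grid → Spec_countPyramids grid (countPyramids grid)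

-- ===== LEMMAS AND PROOFS =====

-- run length of nonzero entries of `row` ending at x (spec of A's `spans`)
def spR (row : List Int) : Nat → Nat
  | 0 => if row.getD 0 0 = 0 then 0 else 1
  | x+1 => if row.getD (x+1) 0 = 0 then 0 else spR row x + 1

-- Tri g H W y x i: the pyramid with apex (y,x) is valid down to level i
def TriP (g : List (List Int)) (H W y x i : Nat) : Prop :=
  x + i < W ∧ y + i < H ∧ i ≤ x ∧
    ∀ c, x - i ≤ c → c ≤ x + i → (g.getD (y+i) []).getD c 0 ≠ 0

def triB (g : List (List Int)) (H W y x i : Nat) : Bool :=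
  decide (x + i < W) && decide (y + i < H) && decide (i ≤ x) &&
    (List.range (x+i+1)).all (fun c => decide (c < x - i) || decide ((g.getD (y+i) []).getD c 0 ≠ 0))

lemma triB_iff (g : List (List Int)) (H W y x i : Nat) :
    triB g H W y x i = true ↔ TriP g H W y x i := by
  simp only [triB, TriP, Bool.and_eq_true, List.all_eq_true, List.mem_range,
    Bool.or_eq_true, decide_eq_true_eq]
  constructor
  · rintro ⟨⟨⟨h1, h2⟩, h3⟩, h4⟩
    refine ⟨h1, h2, h3, fun c hc1 hc2 => ?_⟩
    rcases h4 c (by omega) with h | h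
    · omega
    · exact h
  · rintro ⟨h1, h2, h3, h4⟩
    refine ⟨⟨⟨h1, h2⟩, h3⟩, fun c hc => ?_⟩
    by_cases hlo : c < x - i
    · exact Or.inl hlo
    · exact Or.inr (h4 c (by omega) (by omega))

lemma exNt (g : List (List Int)) (H W y x : Nat) : ∃ i, triB g H W y x i = false := by
  refine ⟨H, ?_⟩
  rw [Bool.eq_false_iff, Ne, triB_iff]
  rintro ⟨-, h2, -, -⟩
  omega

-- first level at which the pyramid with apex (y,x) fails = tallest pyramid height
def Nt (g : List (List Int)) (H W y x : Nat) : Nat := Nat.find (exNt g H W y x)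

lemma not_TriP_Nt (g : List (List Int)) (H W y x : Nat) : ¬ TriP g H W y x (Nt g H W y x) := by
  rw [← triB_iff]
  simp [Nt, Nat.find_spec (exNt g H W y x)]

lemma TriP_of_lt_Nt (g : List (List Int)) (H W y x i : Nat) (h : i < Nt g H W y x) :
    TriP g H W y x i := by
  rw [← triB_iff]
  have := Nat.find_min (exNt g H W y x) h
  simpa using this

lemma Nt_le (g : List (List Int)) (H W y x m : Nat) (h : ¬ TriP g H W y x m) :
    Nt g H W y x ≤ m := by
  apply Nat.find_min'
  rwa [Bool.eq_false_iff, Ne, triB_iff]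

lemma le_Nt (g : List (List Int)) (H W y x m : Nat) (h : ∀ i < m, TriP g H W y x i) :
    m ≤ Nt g H W y x := by
  by_contra hc
  exact not_TriP_Nt g H W y x (h _ (by omega))

lemma Nt_le_H (g : List (List Int)) (H W y x : Nat) : Nt g H W y x ≤ H := by
  apply Nt_le
  rintro ⟨-, h2, -, -⟩
  omega

-- ---- A's spans table computes spR ----
lemma spansRow_fold (row : List Int) (n : Nat) :
    ((List.range n).foldl (fun (st : List Int × Int) x =>
      let count : Int := if row.getD x 0 = 0 then 0 else st.2 + 1
      (st.1 ++ [count], count)) ([], 0)) =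
    ((List.range n).map (fun x => (spR row x : Int)),
      if n = 0 then 0 else (spR row (n-1) : Int)) := by
  induction n with
  | zero => simp
  | succ n ih =>
    rw [List.range_succ, List.foldl_append, ih, List.foldl_cons, List.foldl_nil]
    have hcount : (if row.getD n 0 = 0 then (0:Int)
        else (if n = 0 then 0 else (spR row (n-1) : Int)) + 1) = (spR row n : Int) := by
      cases n with
      | zero => simp only [spR]; split_ifs <;> simp
      | succ m =>
        simp only [spR, Nat.add_sub_cancel, Nat.succ_ne_zero, if_false]
        split_ifs
        · ring
        · push_cast; ring
    simp only []
    rw [List.map_append, hcount]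
    simp

lemma spansOfA_getD (g : List (List Int)) (H W y x : Nat) (hy : y < H) (hx : x < W) :
    ((spansOfA g H W).getD y []).getD x 0 = (spR (g.getD y []) x : Int) := by
  unfold spansOfA
  rw [PySem.List.getD_map_range _ _ _ _ hy, spansRow_fold]
  exact PySem.List.getD_map_range _ _ _ _ hx

-- ---- span run characterisation ----
lemma spR_ge_iff (row : List Int) (x n : Nat) :
    n ≤ spR row x ↔ n ≤ x + 1 ∧ ∀ c, x + 1 - n ≤ c → c ≤ x → row.getD c 0 ≠ 0 := by
  induction x generalizing n with
  | zero =>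
    simp only [spR]
    split_ifs with h
    · constructor
      · intro hn
        refine ⟨by omega, fun c hc1 hc2 => by omega⟩
      · rintro ⟨h1, h2⟩
        by_contra hn
        exact h2 0 (by omega) (by omega) h
    · constructor
      · intro hn
        refine ⟨hn, fun c hc1 hc2 => ?_⟩
        have hc : c = 0 := by omega
        subst hc; exact h
      · rintro ⟨h1, -⟩; exact h1
  | succ x ih =>
    simp only [spR]
    split_ifs with h
    · constructor
      · intro hn
        have hn0 : n = 0 := by omega
        subst hn0
        exact ⟨by omega, fun c hc1 hc2 => by omega⟩
      · rintro ⟨h1, h2⟩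
        by_contra hn
        exact h2 (x+1) (by omega) (by omega) h
    · cases n with
      | zero => exact ⟨fun _ => ⟨by omega, fun c hc1 hc2 => by omega⟩, fun _ => by omega⟩
      | succ m =>
        have : m + 1 ≤ spR row x + 1 ↔ m ≤ spR row x := by omega
        rw [this, ih]
        constructor
        · rintro ⟨h1, h2⟩
          refine ⟨by omega, fun c hc1 hc2 => ?_⟩
          rcases Nat.lt_or_ge c (x+1) with hc | hc
          · exact h2 c (by omega) (by omega)
          · have : c = x + 1 := by omega
            rw [this]; exact h
        · rintro ⟨h1, h2⟩
          exact ⟨by omega, fun c hc1 hc2 => h2 c (by omega) (by omega)⟩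

-- A's loop condition at level i equals TriP
lemma validA_iff (g : List (List Int)) (H W y x i : Nat) :
    (x + i < W ∧ y + i < H ∧ 2*i+1 ≤ spR (g.getD (y+i) []) (x+i)) ↔ TriP g H W y x i := by
  rw [spR_ge_iff]
  unfold TriP
  constructor
  · rintro ⟨h1, h2, h3, h4⟩
    exact ⟨h1, h2, by omega, fun c hc1 hc2 => h4 c (by omega) (by omega)⟩
  · rintro ⟨h1, h2, h3, h4⟩
    exact ⟨h1, h2, by omega, fun c hc1 hc2 => h4 c (by omega) (by omega)⟩

-- ---- goTopA computes Nt ----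
lemma goTopA_eq (g : List (List Int)) (H W y x : Nat) :
    ∀ fuel i, i ≤ Nt g H W y x → Nt g H W y x ≤ i + fuel →
    goTopA (spansOfA g H W) H W y x i fuel =
      (Nt g H W y x : Int) - min (Nt g H W y x) (max i 1) := by
  intro fuel
  induction fuel with
  | zero =>
    intro i h1 h2
    simp only [goTopA]
    omega
  | succ fuel ih =>
    intro i h1 h2
    rcases Nat.eq_or_lt_of_le h1 with heq | hlt
    · -- i = Nt: the loop stops here
      have hnt := not_TriP_Nt g H W y x
      rw [← heq] at hnt
      rw [goTopA]
      by_cases hg : W ≤ x + i ∨ H ≤ y + i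
      · rw [if_pos hg]; omega
      · push Not at hg
        rw [if_neg (by omega)]
        rw [spansOfA_getD g H W (y+i) (x+i) hg.2 hg.1]
        have hlt2 : spR (g.getD (y+i) []) (x+i) < 2*i+1 := by
          by_contra hge
          exact hnt ((validA_iff g H W y x i).1 ⟨hg.1, hg.2, by omega⟩)
        rw [if_pos (by omega)]
        omega
    · -- i < Nt: this level is valid, count and recurse
      have htri := TriP_of_lt_Nt g H W y x i hlt
      have hv := (validA_iff g H W y x i).2 htri
      rw [goTopA, if_neg (by omega),
          spansOfA_getD g H W (y+i) (x+i) hv.2.1 hv.1,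
          if_neg (by omega),
          ih (i+1) (by omega) (by omega)]
      split_ifs <;> push_cast <;> omega

-- ---- reflection: rows of g.reverse ----
lemma rowOf_reverse (g : List (List Int)) (y : Nat) (hy : y < g.length) :
    g.reverse.getD y [] = g.getD (g.length - 1 - y) [] := by
  rw [List.getD_eq_getElem?_getD, List.getD_eq_getElem?_getD,
      List.getElem?_reverse (by simpa using hy)]

-- A's upward loop condition at level i equals TriP of the vertically flipped grid
lemma validI_iff (g : List (List Int)) (W y x i : Nat) (hy : y < g.length) :
    (x + i < W ∧ i ≤ y ∧ 2*i+1 ≤ spR (g.getD (y-i) []) (x+i)) ↔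
      TriP g.reverse g.length W (g.length - 1 - y) x i := by
  have hrow : i ≤ y → g.reverse.getD (g.length - 1 - y + i) [] = g.getD (y - i) [] := by
    intro hi
    rw [rowOf_reverse g _ (by omega)]
    congr 1
    omega
  unfold TriP
  constructor
  · rintro ⟨h1, h2, h3⟩
    rw [spR_ge_iff] at h3
    refine ⟨h1, by omega, by omega, fun c hc1 hc2 => ?_⟩
    rw [hrow h2]
    exact h3.2 c (by omega) (by omega)
  · rintro ⟨h1, h2, h3, h4⟩
    have hi : i ≤ y := by omega
    refine ⟨h1, hi, ?_⟩
    rw [spR_ge_iff]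
    refine ⟨by omega, fun c hc1 hc2 => ?_⟩
    rw [← hrow hi]
    exact h4 c (by omega) (by omega)

-- ---- goInvA computes Nt of the flipped grid ----
lemma goInvA_eq (g : List (List Int)) (W y x : Nat) (hy : y < g.length) :
    ∀ fuel i, i ≤ Nt g.reverse g.length W (g.length - 1 - y) x →
      Nt g.reverse g.length W (g.length - 1 - y) x ≤ i + fuel →
    goInvA (spansOfA g g.length W) g.length W y x i fuel =
      (Nt g.reverse g.length W (g.length - 1 - y) x : Int) -
        min (Nt g.reverse g.length W (g.length - 1 - y) x) (max i 1) := by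
  intro fuel
  induction fuel with
  | zero =>
    intro i h1 h2
    simp only [goInvA]
    omega
  | succ fuel ih =>
    intro i h1 h2
    rcases Nat.eq_or_lt_of_le h1 with heq | hlt
    · have hnt := not_TriP_Nt g.reverse g.length W (g.length - 1 - y) x
      rw [← heq] at hnt
      rw [goInvA]
      by_cases hg : W ≤ x + i ∨ y < i
      · rw [if_pos hg]; omega
      · push Not at hg
        rw [if_neg (by omega)]
        rw [spansOfA_getD g g.length W (y-i) (x+i) (by omega) hg.1]
        have hlt2 : spR (g.getD (y-i) []) (x+i) < 2*i+1 := by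
          by_contra hge
          exact hnt ((validI_iff g W y x i hy).1 ⟨hg.1, by omega, by omega⟩)
        rw [if_pos (by omega)]
        omega
    · have htri := TriP_of_lt_Nt g.reverse g.length W (g.length - 1 - y) x i hlt
      have hv := (validI_iff g W y x i hy).2 htri
      rw [goInvA, if_neg (by omega),
          spansOfA_getD g g.length W (y-i) (x+i) (by omega) hv.1,
          if_neg (by omega),
          ih (i+1) (by omega) (by omega)]
      split_ifs <;> push_cast <;> omega

-- ---- TriP step recurrence ----
lemma TriP_succ_iff (g : List (List Int)) (H W y x i : Nat) (hx1 : 1 ≤ x) :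
    TriP g H W y x (i+1) ↔
      TriP g H W (y+1) (x-1) i ∧ TriP g H W (y+1) x i ∧ TriP g H W (y+1) (x+1) i := by
  have e : y + 1 + i = y + (i + 1) := by omega
  unfold TriP
  constructor
  · rintro ⟨h1, h2, h3, h4⟩
    refine ⟨⟨by omega, by omega, by omega, fun c hc1 hc2 => ?_⟩,
            ⟨by omega, by omega, by omega, fun c hc1 hc2 => ?_⟩,
            ⟨by omega, by omega, by omega, fun c hc1 hc2 => ?_⟩⟩ <;>
      · rw [e]; exact h4 c (by omega) (by omega)
  · rintro ⟨⟨l1, l2, l3, l4⟩, ⟨m1, m2, m3, m4⟩, ⟨r1, r2, r3, r4⟩⟩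
    refine ⟨by omega, by omega, by omega, fun c hc1 hc2 => ?_⟩
    rw [← e]
    rcases Nat.lt_or_ge (x - 1 + i) c with hcr | hcl
    · rcases Nat.lt_or_ge (x + i) c with hcr2 | hcm
      · exact r4 c (by omega) (by omega)
      · exact m4 c (by omega) (by omega)
    · exact l4 c (by omega) (by omega)

-- ---- B's DP ----
def dps (g : List (List Int)) (H W y x : Nat) : Nat :=
  if H ≤ y then 0
  else if W ≤ x ∨ (g.getD y []).getD x 0 = 0 then 0
  else 1 + min (min (if x = 0 then 0 else dps g H W (y+1) (x-1)) (dps g H W (y+1) x))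
               (if x+1 < W then dps g H W (y+1) (x+1) else 0)
termination_by H - y
decreasing_by all_goals omega

lemma dps_eq_Nt (g : List (List Int)) (H W : Nat) :
    ∀ y x, dps g H W y x = Nt g H W y x := by
  suffices h : ∀ n y x, H - y ≤ n → dps g H W y x = Nt g H W y x from
    fun y x => h (H - y) y x le_rfl
  intro n
  induction n with
  | zero =>
    intro y x hy
    rw [dps, if_pos (by omega)]
    have := Nt_le g H W y x 0 (by rintro ⟨-, h2, -, -⟩; omega)
    omega
  | succ n ih =>
    intro y x hy
    by_cases hH : H ≤ y
    · rw [dps, if_pos hH]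
      have := Nt_le g H W y x 0 (by rintro ⟨-, h2, -, -⟩; omega)
      omega
    rw [dps, if_neg hH]
    by_cases h0 : W ≤ x ∨ (g.getD y []).getD x 0 = 0
    · rw [if_pos h0]
      have hn : ¬ TriP g H W y x 0 := by
        rintro ⟨t1, t2, t3, t4⟩
        rcases h0 with h | h
        · omega
        · exact t4 x (by omega) (by omega) h
      have := Nt_le g H W y x 0 hn
      omega
    · rw [if_neg h0]
      push Not at h0
      have htri0 : TriP g H W y x 0 := by
        refine ⟨by omega, by omega, by omega, fun c hc1 hc2 => ?_⟩
        have hc : c = x := by omega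
        rw [hc]; exact h0.2
      by_cases hx0 : x = 0
      · subst hx0
        rw [if_pos rfl]
        have hub := Nt_le g H W y 0 1 (by rintro ⟨-, -, h3, -⟩; omega)
        have hlb := le_Nt g H W y 0 1 (by
          intro i hi
          have : i = 0 := by omega
          rw [this]; exact htri0)
        omega
      by_cases hx1 : x + 1 < W
      · rw [if_neg hx0, if_pos hx1,
            ih (y+1) (x-1) (by omega), ih (y+1) x (by omega), ih (y+1) (x+1) (by omega)]
        set Na := Nt g H W (y+1) (x-1) with hNa
        set Nb := Nt g H W (y+1) x with hNb
        set Nc := Nt g H W (y+1) (x+1) with hNc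
        set m := min (min Na Nb) Nc with hm
        have hub : Nt g H W y x ≤ m + 1 := by
          apply Nt_le
          intro htri
          rw [TriP_succ_iff g H W y x m (by omega)] at htri
          have h3 : m = Na ∨ m = Nb ∨ m = Nc := by omega
          rcases h3 with h | h | h <;> rw [h] at htri
          · exact not_TriP_Nt g H W (y+1) (x-1) htri.1
          · exact not_TriP_Nt g H W (y+1) x htri.2.1
          · exact not_TriP_Nt g H W (y+1) (x+1) htri.2.2
        have hlb : m + 1 ≤ Nt g H W y x := by
          apply le_Nt
          intro i hi
          cases i with
          | zero => exact htri0
          | succ k =>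
            rw [TriP_succ_iff g H W y x k (by omega)]
            exact ⟨TriP_of_lt_Nt _ _ _ _ _ _ (by omega),
                   TriP_of_lt_Nt _ _ _ _ _ _ (by omega),
                   TriP_of_lt_Nt _ _ _ _ _ _ (by omega)⟩
        omega
      · rw [if_neg hx0, if_neg hx1]
        have hub := Nt_le g H W y x 1 (by rintro ⟨t1, -, -, -⟩; omega)
        have hlb := le_Nt g H W y x 1 (by
          intro i hi
          have : i = 0 := by omega
          rw [this]; exact htri0)
        omega

-- foldl accumulating a sum, as a list sum
lemma foldl_plus (f : Int → Int) (l : List Int) : ∀ c : Int,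
    l.foldl (fun s v => s + f v) c = c + (l.map f).sum := by
  induction l with
  | nil => intro c; simp
  | cons a t ih => intro c; simp only [List.foldl_cons, List.map_cons, List.sum_cons, ih]; ring

lemma listSum_range (n : Nat) (f : Nat → Int) :
    ((List.range n).map f).sum = ∑ i ∈ Finset.range n, f i := rfl

-- invariant of B's row sweep: after processing rows y..H-1 (bottom-up), the DP row
-- is `dps` at row y and the accumulator is the total over those rows
lemma dirFoldB (g : List (List Int)) (W : Nat) :
    ∀ n y, g.length - y ≤ n →
    ((g.drop y).reverse.foldl (fun (st : List Int × Int) row =>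
      let cur := (List.range W).map (fun x =>
        if row.getD x 0 = 0 then 0
        else 1 + min (min (if 0 < x then st.1.getD (x-1) 0 else 0) (st.1.getD x 0))
                     (if x+1 < W then st.1.getD (x+1) 0 else 0))
      (cur, st.2 + cur.foldl (fun s v => s + max (v-1) 0) 0))
      (List.replicate W 0, 0)) =
    ((List.range W).map (fun x => (dps g g.length W y x : Int)),
     ∑ y' ∈ Finset.Ico y g.length, ∑ x ∈ Finset.range W,
       max ((dps g g.length W y' x : Int) - 1) 0) := by
  intro n
  induction n with
  | zero =>
    intro y h1
    have hdrop : g.drop y = [] := List.drop_eq_nil_of_le (by omega)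
    have hdps : ∀ x, dps g g.length W y x = 0 := fun x => by rw [dps, if_pos (by omega)]
    rw [hdrop, Finset.Ico_eq_empty (by omega)]
    simp [hdps]
  | succ n ih =>
    intro y h1
    by_cases hge : g.length ≤ y
    · exact ih y (by omega)
    have hlt : y < g.length := by omega
    rw [List.drop_eq_getElem_cons hlt, List.reverse_cons, List.foldl_append,
        ih (y+1) (by omega), List.foldl_cons, List.foldl_nil]
    have hrow : g[y] = g.getD y [] := (List.getD_eq_getElem g [] hlt).symm
    have hga : ∀ z, z < W →
        ((List.range W).map (fun x => (dps g g.length W (y+1) x : Int))).getD z 0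
          = (dps g g.length W (y+1) z : Int) :=
      fun z hz => PySem.List.getD_map_range _ _ _ _ hz
    have hcur : (List.range W).map (fun x =>
        if g[y].getD x 0 = 0 then (0:Int)
        else 1 + min (min (if 0 < x then ((List.range W).map (fun x => (dps g g.length W (y+1) x : Int))).getD (x-1) 0 else 0)
                          (((List.range W).map (fun x => (dps g g.length W (y+1) x : Int))).getD x 0))
                     (if x+1 < W then ((List.range W).map (fun x => (dps g g.length W (y+1) x : Int))).getD (x+1) 0 else 0))
        = (List.range W).map (fun x => (dps g g.length W y x : Int)) := by
      apply List.map_congr_left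
      intro x hx
      rw [List.mem_range] at hx
      rw [hrow, dps, if_neg (show ¬ g.length ≤ y by omega)]
      by_cases hc : (g.getD y []).getD x 0 = 0
      · rw [if_pos hc, if_pos (Or.inr hc)]
        simp
      · have e1 : (if 0 < x then ((List.range W).map (fun x => (dps g g.length W (y+1) x : Int))).getD (x-1) 0 else 0)
            = ((if x = 0 then 0 else dps g g.length W (y+1) (x-1) : Nat) : Int) := by
          by_cases hx0 : x = 0
          · simp [hx0]
          · rw [if_pos (by omega), if_neg hx0, hga (x-1) (by omega)]
        have e2 := hga x hx
        have e3 : (if x+1 < W then ((List.range W).map (fun x => (dps g g.length W (y+1) x : Int))).getD (x+1) 0 else 0)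
            = ((if x+1 < W then dps g g.length W (y+1) (x+1) else 0 : Nat) : Int) := by
          by_cases hx1 : x+1 < W
          · rw [if_pos hx1, if_pos hx1, hga (x+1) hx1]
          · rw [if_neg hx1, if_neg hx1]; simp
        rw [if_neg hc,
            if_neg (show ¬ (W ≤ x ∨ (g.getD y []).getD x 0 = 0) by push Not; exact ⟨by omega, hc⟩),
            e1, e2, e3]
        push_cast
        omega
    simp only []
    rw [Prod.mk.injEq]
    refine ⟨hcur, ?_⟩
    rw [hcur, foldl_plus, List.map_map, listSum_range,
        Finset.sum_eq_sum_Ico_succ_bot hlt]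
    simp only [Function.comp]
    ring

lemma dirCountB_eq (g : List (List Int)) (W : Nat) :
    dirCountB g W = ∑ y ∈ Finset.range g.length, ∑ x ∈ Finset.range W,
      max ((Nt g g.length W y x : Int) - 1) 0 := by
  have hmain := dirFoldB g W (g.length) 0 (by omega)
  rw [List.drop_zero] at hmain
  unfold dirCountB
  rw [hmain]
  dsimp only
  rw [← Finset.range_eq_Ico]
  apply Finset.sum_congr rfl
  intro y _
  apply Finset.sum_congr rfl
  intro x _
  rw [dps_eq_Nt]

-- foldl over range accumulating through F = adding f, as a Finset sum
lemma foldl_range_sum (F : Int → Nat → Int) (f : Nat → Int) (hF : ∀ r k, F r k = r + f k) :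
    ∀ n (c : Int), (List.range n).foldl F c = c + ∑ k ∈ Finset.range n, f k := by
  intro n
  induction n with
  | zero => intro c; simp
  | succ n ih =>
    intro c
    rw [List.range_succ, List.foldl_append, ih, List.foldl_cons, List.foldl_nil, hF,
        Finset.sum_range_succ]
    ring

lemma innerFoldA (spans : List (List Int)) (H W y : Nat) (r : Int) :
    (List.range W).foldl (fun r x => r + goTopA spans H W y x 0 H + goInvA spans H W y x 0 H) r
      = r + ∑ x ∈ Finset.range W, (goTopA spans H W y x 0 H + goInvA spans H W y x 0 H) :=
  foldl_range_sum _ (fun x => goTopA spans H W y x 0 H + goInvA spans H W y x 0 H)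
    (fun r k => by ring) W r

lemma countPyramids_eq_sum (g : List (List Int)) :
    countPyramids g = ∑ y ∈ Finset.range g.length, ∑ x ∈ Finset.range (g.headD []).length,
      (goTopA (spansOfA g g.length (g.headD []).length) g.length (g.headD []).length y x 0 g.length
       + goInvA (spansOfA g g.length (g.headD []).length) g.length (g.headD []).length y x 0 g.length) := by
  simp only [countPyramids]
  rw [foldl_range_sum _
    (fun y => ∑ x ∈ Finset.range (g.headD []).length,
      (goTopA (spansOfA g g.length (g.headD []).length) g.length (g.headD []).length y x 0 g.length
       + goInvA (spansOfA g g.length (g.headD []).length) g.length (g.headD []).length y x 0 g.length))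
    (fun r y => innerFoldA (spansOfA g g.length (g.headD []).length) g.length (g.headD []).length y r)
    g.length 0, zero_add]

-- ===== VERDICT (by name: the statement is the Claim_ definition above) =====
theorem countPyramids_spec : Claim_equal_countPyramids := by
  intro g _ _
  unfold Spec_countPyramids
  simp only [countPyramids_alt]
  rw [countPyramids_eq_sum, dirCountB_eq g (g.headD []).length,
      dirCountB_eq g.reverse (g.headD []).length, List.length_reverse]
  have hcell : ∀ y, y < g.length → ∀ x : Nat,
      (goTopA (spansOfA g g.length (g.headD []).length) g.length (g.headD []).length y x 0 g.length
       + goInvA (spansOfA g g.length (g.headD []).length) g.length (g.headD []).length y x 0 g.length)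
      = max ((Nt g g.length (g.headD []).length y x : Int) - 1) 0
        + max ((Nt g.reverse g.length (g.headD []).length (g.length - 1 - y) x : Int) - 1) 0 := by
    intro y hy x
    rw [goTopA_eq g g.length (g.headD []).length y x g.length 0 (by omega)
          (by have := Nt_le_H g g.length (g.headD []).length y x; omega),
        goInvA_eq g (g.headD []).length y x hy g.length 0 (by omega)
          (by have := Nt_le_H g.reverse g.length (g.headD []).length (g.length - 1 - y) x; omega)]
    omega
  calc (∑ y ∈ Finset.range g.length, ∑ x ∈ Finset.range (g.headD []).length,
      (goTopA (spansOfA g g.length (g.headD []).length) g.length (g.headD []).length y x 0 g.length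
       + goInvA (spansOfA g g.length (g.headD []).length) g.length (g.headD []).length y x 0 g.length))
      = ∑ y ∈ Finset.range g.length, ∑ x ∈ Finset.range (g.headD []).length,
        (max ((Nt g g.length (g.headD []).length y x : Int) - 1) 0
         + max ((Nt g.reverse g.length (g.headD []).length (g.length - 1 - y) x : Int) - 1) 0) :=
      Finset.sum_congr rfl (fun y hy => Finset.sum_congr rfl
        (fun x _ => hcell y (Finset.mem_range.1 hy) x))
    _ = (∑ y ∈ Finset.range g.length, ∑ x ∈ Finset.range (g.headD []).length,
          max ((Nt g g.length (g.headD []).length y x : Int) - 1) 0)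
        + ∑ y ∈ Finset.range g.length, ∑ x ∈ Finset.range (g.headD []).length,
          max ((Nt g.reverse g.length (g.headD []).length (g.length - 1 - y) x : Int) - 1) 0 := by
      simp [Finset.sum_add_distrib]
    _ = (∑ y ∈ Finset.range g.length, ∑ x ∈ Finset.range (g.headD []).length,
          max ((Nt g g.length (g.headD []).length y x : Int) - 1) 0)
        + ∑ y ∈ Finset.range g.length, ∑ x ∈ Finset.range (g.headD []).length,
          max ((Nt g.reverse g.length (g.headD []).length y x : Int) - 1) 0 := by
      rw [Finset.sum_range_reflect (fun y => ∑ x ∈ Finset.range (g.headD []).length,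
        max ((Nt g.reverse g.length (g.headD []).length y x : Int) - 1) 0) g.length]
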